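-- pv_equiv track=rewrite | github.com/m4r13m/programming-mooc-fi- | Part-4/part04-11_first_second_last/src/first_second_last.py | second_word
-- ===== SOURCE A (Python) =====
-- def second_word(sentence):
--     i = sentence.count(" ")
--     j = sentence.find(" ")
--     if i == 1:
--         return sentence[j + 1: ]
--     l = j + 1
--     while l < len(sentence):
--         if sentence[l] == " ":
--             break
--         l += 1
--     return sentence[j + 1: l]
-- ===== SOURCE B (Python) =====
-- def second_word(sentence):
--     parts = sentence.split(" ")
--     return parts[1] if len(parts) > 1 else parts[0]
-- ===== Notes on version B (the rewrite author's own statement) =====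
-- stated objective: idiomatic
-- what changed: Replaces A's space-count + find + manual character scan to the second space with one single-space split that materializes all tokens and indexes the second (or the only) one.
import Mathlib
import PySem

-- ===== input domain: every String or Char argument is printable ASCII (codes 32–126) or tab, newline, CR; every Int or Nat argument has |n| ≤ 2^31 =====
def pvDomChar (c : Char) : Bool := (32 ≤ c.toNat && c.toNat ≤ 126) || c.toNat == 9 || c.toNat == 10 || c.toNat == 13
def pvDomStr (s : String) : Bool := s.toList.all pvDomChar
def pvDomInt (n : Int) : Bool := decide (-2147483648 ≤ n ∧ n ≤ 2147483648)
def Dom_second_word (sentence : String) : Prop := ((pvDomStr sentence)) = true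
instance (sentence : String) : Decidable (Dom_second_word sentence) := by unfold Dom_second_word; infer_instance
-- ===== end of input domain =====

-- B replaces A's count/find/manual scan with one single-space split and an index; same O(n) cost, more idiomatic (and measured faster via the C-level split).

-- ===== PORT A =====
-- the 'while l < len(sentence): if sentence[l] == " ": break; l += 1' loop of A
def secondWordScan (cs : List Char) (l : Nat) : Nat :=
  if h : l < cs.length then
    if cs[l]! = ' ' then l else secondWordScan cs (l + 1)
  else l
termination_by cs.length - l

def second_word (sentence : String) : String :=
  let i := PySem.Str.count sentence " "
  let j := PySem.Str.find sentence " "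
  if i = 1 then
    PySem.Str.slice sentence (some (j + 1)) none
  else
    let l := secondWordScan sentence.toList (j + 1).toNat
    PySem.Str.slice sentence (some (j + 1)) (some (l : Int))

-- ===== PORT B =====
def second_word_alt (sentence : String) : String :=
  let parts := (PySem.Str.split? sentence " ").getD []
  if 1 < parts.length then parts.getD 1 "" else parts.getD 0 ""

-- ===== PRECONDITION & SPEC =====
def Spec_second_word (sentence : String) (out : String) : Prop := out = second_word_alt sentence
instance (sentence : String) (out : String) : Decidable (Spec_second_word sentence out) := by unfold Spec_second_word; infer_instance

-- ===== CLAIM (what is proved, stated in full; the proofs are below) =====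
def Claim_equal_second_word : Prop := ∀ (sentence : String), Dom_second_word sentence → Spec_second_word sentence (second_word sentence)

-- ===== LEMMAS AND PROOFS =====

-- simple recursive form of splitting on a single space
def spSplit : List Char → List (List Char)
  | [] => [[]]
  | c :: t =>
    if c = ' ' then [] :: spSplit t
    else
      match spSplit t with
      | [] => [[c]]
      | h :: r => (c :: h) :: r

theorem spSplit_ne_nil (cs : List Char) : spSplit cs ≠ [] := by
  cases cs with
  | nil => simp [spSplit]
  | cons c t =>
    simp only [spSplit]
    split_ifs
    · simp
    · cases h : spSplit t <;> simp

theorem spSplit_length (cs : List Char) : (spSplit cs).length = cs.count ' ' + 1 := by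
  induction cs with
  | nil => simp [spSplit]
  | cons c t ih =>
    simp only [spSplit]
    split_ifs with hc
    · simp [List.count_cons, hc, ih]
    · have h2 : (c == ' ') = false := by simpa using hc
      cases h : spSplit t with
      | nil => exact absurd h (spSplit_ne_nil t)
      | cons a r => simp [List.count_cons, h2, ← ih, h]

theorem spSplit_eq (cs : List Char) :
    spSplit cs = cs.takeWhile (fun c => !(c == ' ')) ::
      (match cs.dropWhile (fun c => !(c == ' ')) with
       | [] => []
       | _ :: r => spSplit r) := by
  induction cs with
  | nil => simp [spSplit]
  | cons c t ih =>
    simp only [spSplit]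
    split_ifs with hc
    · subst hc; simp
    · have h2 : (c == ' ') = false := by simpa using hc
      cases h : spSplit t with
      | nil => exact absurd h (spSplit_ne_nil t)
      | cons a r =>
        rw [h] at ih
        simp only [List.takeWhile_cons, List.dropWhile_cons, h2, Bool.not_false, if_true]
        rw [List.cons.injEq] at ih
        rw [ih.1, ih.2]

theorem splitOn_space_go (fuel : Nat) (l cur : List Char) (acc : List (List Char))
    (h : l.length < fuel) :
    PySem.Chars.splitOn.go [' '] fuel l cur acc =
      acc.reverse ++ (spSplit l).modifyHead (fun x => cur.reverse ++ x) := by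
  induction fuel generalizing l cur acc with
  | zero => omega
  | succ f ih =>
    cases l with
    | nil => simp [PySem.Chars.splitOn.go, spSplit]
    | cons c t =>
      rw [PySem.Chars.splitOn.go]
      by_cases hc : c = ' '
      · subst hc
        have hp : ([' '] : List Char).isPrefixOf (' ' :: t) = true := by
          simp [List.isPrefixOf]
        simp only [hp, if_true]
        have hd : List.drop ([' '] : List Char).length (' ' :: t) = t := by simp
        have hlt : t.length < f := by simp at h; omega
        rw [hd, ih t [] (List.reverse cur :: acc) hlt]
        simp only [spSplit]
        cases spSplit t <;> simp
      · have hp : ([' '] : List Char).isPrefixOf (c :: t) = false := by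
          simp [List.isPrefixOf]
          exact fun a => hc a.symm
        simp only [hp, if_false]
        have hlt : t.length < f := by simp at h; omega
        rw [ih t (c :: cur) acc hlt]
        simp only [spSplit, if_neg hc]
        cases h : spSplit t with
        | nil => exact absurd h (spSplit_ne_nil t)
        | cons a r => simp [h, List.append_assoc]

theorem splitOn_space (cs : List Char) : PySem.Chars.splitOn cs [' '] = spSplit cs := by
  rw [PySem.Chars.splitOn, splitOn_space_go (cs.length + 1) cs [] [] (by omega)]
  cases spSplit cs <;> simp

theorem count_space_go (fuel : Nat) (cs : List Char) (acc : Nat) (h : cs.length ≤ fuel) :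
    PySem.Chars.count.go [' '] fuel cs acc = acc + cs.count ' ' := by
  induction fuel generalizing cs acc with
  | zero =>
    interval_cases h' : cs.length
    · rw [List.length_eq_zero_iff.mp h']; simp [PySem.Chars.count.go]
  | succ f ih =>
    cases cs with
    | nil => simp [PySem.Chars.count.go]
    | cons c t =>
      simp only [PySem.Chars.count.go, List.isPrefixOf]
      by_cases hc : c = ' '
      · subst hc; simp only [List.length_cons] at h
        simp [ih t (acc+1) (by omega), List.count_cons]
        omega
      · have : (' ' == c) = false := by simp [hc]; exact fun a => hc a.symm
        simp only [List.length_cons] at h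
        simp [this, ih t acc (by omega), List.count_cons, hc]

theorem count_space (cs : List Char) : PySem.Chars.count cs [' '] = cs.count ' ' := by
  have : ([' '] : List Char).isEmpty = false := rfl
  simp [PySem.Chars.count, this, count_space_go cs.length cs 0 le_rfl]

theorem find_space_go (cs : List Char) (k : Nat) :
    PySem.Chars.find.go [' '] cs k =
      if cs.count ' ' = 0 then -1
      else ((k : Int) + (cs.takeWhile (fun c => !(c == ' '))).length) := by
  induction cs generalizing k with
  | nil => simp [PySem.Chars.find.go]
  | cons c t ih =>
    simp only [PySem.Chars.find.go, List.isPrefixOf]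
    by_cases hc : c = ' '
    · subst hc; simp [List.count_cons]
    · have h1 : (' ' == c) = false := by simpa using fun a => hc a.symm
      have h2 : (c == ' ') = false := by simpa using hc
      simp only [h1, Bool.false_and, if_false, ih (k+1), List.count_cons, h2,
        List.takeWhile_cons, Bool.not_false, if_true]
      split_ifs <;> simp_all <;> push_cast <;> ring

theorem find_space (cs : List Char) :
    PySem.Chars.find cs [' '] =
      if cs.count ' ' = 0 then -1
      else ((cs.takeWhile (fun c => !(c == ' '))).length : Int) := by
  simpa using find_space_go cs 0

theorem scan_eq (cs : List Char) (l : Nat) :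
    secondWordScan cs l = l + ((cs.drop l).takeWhile (fun c => !(c == ' '))).length := by
  fun_induction secondWordScan cs l with
  | case1 l h hsp =>
    have hd : cs.drop l = cs[l] :: cs.drop (l+1) := by
      rw [List.drop_eq_getElem_cons h]
    rw [hd, List.takeWhile_cons]
    have : (cs[l] == ' ') = true := by
      simpa [List.getElem!_eq_getElem?_getD, List.getElem?_eq_getElem h] using hsp
    simp [this]
  | case2 l h hsp ih =>
    have hd : cs.drop l = cs[l] :: cs.drop (l+1) := by
      rw [List.drop_eq_getElem_cons h]
    rw [hd, List.takeWhile_cons]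
    have : (cs[l] == ' ') = false := by
      simpa [List.getElem!_eq_getElem?_getD, List.getElem?_eq_getElem h] using hsp
    simp [this, ih]
    omega
  | case3 l h =>
    have : cs.drop l = [] := List.drop_eq_nil_of_le (by omega)
    simp [this]

theorem spSplit_no_space (cs : List Char) (h : cs.count ' ' = 0) : spSplit cs = [cs] := by
  induction cs with
  | nil => rfl
  | cons c t ih =>
    by_cases hc : c = ' '
    · subst hc; simp at h
    · have ht : t.count ' ' = 0 := by
        simp [List.count_cons, hc] at h
        simpa using h
      simp [spSplit, hc, ih ht]

-- ===== VERDICT (by name: the statement is the Claim_ definition above) =====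
theorem dropWhile_head_false {p : Char → Bool} (l : List Char) (a : Char) (r : List Char)
    (h : l.dropWhile p = a :: r) : p a = false := by
  induction l with
  | nil => simp at h
  | cons c t ih =>
    by_cases hc : p c
    · rw [List.dropWhile_cons_of_pos hc] at h; exact ih h
    · rw [List.dropWhile_cons_of_neg hc] at h
      cases h
      simpa using hc

theorem second_word_spec : Claim_equal_second_word := by
  unfold Claim_equal_second_word
  intro sentence _
  unfold Spec_second_word second_word second_word_alt
  have hsep : (" ").toList = [' '] := rfl
  have hsplit : PySem.Str.split? sentence " " = some ((spSplit sentence.toList).map String.ofList) := by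
    simp [PySem.Str.split?, PySem.Chars.split?, hsep, splitOn_space]
  have hcount : PySem.Str.count sentence " " = sentence.toList.count ' ' := by
    simp [PySem.Str.count, hsep, count_space]
  have hfind : PySem.Str.find sentence " " =
      (if sentence.toList.count ' ' = 0 then -1
       else ((sentence.toList.takeWhile (fun c => !(c == ' '))).length : Int)) := by
    simp [PySem.Str.find, hsep, find_space]
  rw [hsplit, hcount]
  simp only [Option.getD_some, List.length_map, spSplit_length]
  rcases Nat.lt_or_ge (sentence.toList.count ' ') 1 with h0 | h1
  · -- no space: A scans to the end of the string, B has a single part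
    have h0 : sentence.toList.count ' ' = 0 := by omega
    have hfindv : PySem.Str.find sentence " " = -1 := by rw [hfind, if_pos h0]
    have htw : sentence.toList.takeWhile (fun c => !(c == ' ')) = sentence.toList := by
      rw [List.takeWhile_eq_self_iff]
      intro x hx
      have : x ≠ ' ' := fun e => by
        subst e; exact absurd (List.count_eq_zero.mp h0) (by simpa using hx)
      simpa using this
    rw [hfindv, if_neg (by omega), if_neg (by omega), spSplit_no_space _ h0]
    have hsc : secondWordScan sentence.toList ((-1 + 1 : Int)).toNat = sentence.toList.length := by
      rw [show ((-1 + 1 : Int)).toNat = 0 from rfl, scan_eq]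
      simp [htw]
    rw [hsc, show ((-1 : Int) + 1) = ((0 : Nat) : Int) by norm_num]
    simp only [PySem.Str.slice, PySem.Chars.slice, PySem.List.slice_natCast, List.drop_zero,
      Nat.sub_zero]
    rw [List.take_of_length_le (by simp [String.length_toList]), String.ofList_toList]
    simp
  · -- at least one space: decompose the string at its first space
    set p : Char → Bool := fun c => !(c == ' ') with hp
    set t := sentence.toList.takeWhile p with htdef
    have htc : t.count ' ' = 0 := by
      rw [List.count_eq_zero]
      intro hm
      have := List.mem_takeWhile_imp hm
      simp [hp] at this
    have hne : sentence.toList.dropWhile p ≠ [] := by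
      intro hd
      have heq : t ++ ([] : List Char) = sentence.toList := by
        rw [htdef, ← hd]; exact List.takeWhile_append_dropWhile
      rw [List.append_nil] at heq
      rw [← heq] at h1
      omega
    obtain ⟨a, r, hd⟩ : ∃ a r, sentence.toList.dropWhile p = a :: r := by
      cases hdd : sentence.toList.dropWhile p with
      | nil => exact absurd hdd hne
      | cons a r => exact ⟨a, r, rfl⟩
    have ha : a = ' ' := by
      have := dropWhile_head_false sentence.toList a r hd
      simpa [hp] using this
    subst ha
    have hcseq : t ++ ' ' :: r = sentence.toList := by
      rw [htdef, ← hd]; exact List.takeWhile_append_dropWhile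
    have hcnt : sentence.toList.count ' ' = r.count ' ' + 1 := by
      rw [← hcseq, List.count_append, htc, List.count_cons]
      simp
    have hfindv : PySem.Str.find sentence " " = (t.length : Int) := by
      rw [hfind, if_neg (by omega)]
    have hdropcs : sentence.toList.drop (t.length + 1) = r := by
      have hx : sentence.toList.drop t.length = ' ' :: r := by
        conv_lhs => rw [← hcseq]
        exact List.drop_left
      rw [← List.drop_drop, hx]
      rfl
    have hspl : spSplit sentence.toList = t :: spSplit r := by
      rw [spSplit_eq sentence.toList, ← htdef, ← hp, hd]
    have hcast : ((t.length : Int) + 1) = ((t.length + 1 : Nat) : Int) := by push_cast; ring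
    rw [hfindv]
    rcases Nat.lt_or_ge (sentence.toList.count ' ') 2 with hc1 | hc2
    · -- exactly one space: A takes the tail after it, B the second of two parts
      have hc1 : sentence.toList.count ' ' = 1 := by omega
      have hr0 : r.count ' ' = 0 := by omega
      rw [if_pos hc1, if_pos (by omega), hspl, spSplit_no_space _ hr0]
      simp only [PySem.Str.slice, PySem.Chars.slice, List.map_cons, List.getD_cons_succ,
        List.getD_cons_zero, hcast, PySem.List.slice_from_natCast, hdropcs]
    · -- two or more spaces: A scans to the next space, B takes the second part
      rw [if_neg (by omega), if_pos (by omega)]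
      have htn : (((t.length : Int) + 1)).toNat = t.length + 1 := by
        rw [hcast, Int.toNat_natCast]
      rw [htn, scan_eq, hdropcs]
      have htake : r.take (r.takeWhile p).length = r.takeWhile p := by
        obtain ⟨v, hv⟩ := List.takeWhile_prefix (l := r) p
        have h2 : (r.takeWhile p ++ v).take (r.takeWhile p).length = r.takeWhile p :=
          List.take_left
        rwa [hv] at h2
      obtain ⟨rest, hrest⟩ : ∃ rest, spSplit r = r.takeWhile p :: rest := ⟨_, spSplit_eq r⟩
      rw [hspl, hrest]
      rw [hp] at htake
      have hcast2 : ((t.length : Int) + 1 + ((List.takeWhile (fun c => !(c == ' ')) r).length : Int))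
          = ((t.length + 1 + (List.takeWhile (fun c => !(c == ' ')) r).length : Nat) : Int) := by
        push_cast; ring
      simp only [PySem.Str.slice, PySem.Chars.slice, List.map_cons, List.getD_cons_succ,
        List.getD_cons_zero, hcast2, hcast, PySem.List.slice_natCast, hdropcs,
        Nat.add_sub_cancel_left, htake]
      rw [hp]
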